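-- pv_equiv track=rewrite | github.com/qcjjsyx/LX-Agent | backend/skills/catalog/rtl-manual-generation/packages/tools/cc_header_tools/parser.py | extract_cc_block
-- ===== SOURCE A (Python) =====
-- def extract_cc_block(text: str):
--     lines = text.splitlines()
--     block = []
--     in_block = False
--     for line in lines:
--         if line.lstrip().startswith("//@cc:"):
--             in_block = True
--             content = line.split("//@cc:", 1)[1]
--             if content.startswith(" "):
--                 content = content[1:]
--             block.append(content.rstrip("\n"))
--         else:
--             if in_block:
--                 break
--     if not block:
--         return None, []
--     return "\n".join(block).strip(), block
-- ===== SOURCE B (Python) =====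
-- def _is_cc(line):
--     return line.lstrip().startswith("//@cc:")
--
--
-- def _content(line):
--     content = line.split("//@cc:", 1)[1]
--     if content.startswith(" "):
--         content = content[1:]
--     return content.rstrip("\n")
--
--
-- def _drop_non_cc(lines):
--     if lines and not _is_cc(lines[0]):
--         return _drop_non_cc(lines[1:])
--     return lines
--
--
-- def _take_cc(lines):
--     if lines and _is_cc(lines[0]):
--         return [lines[0]] + _take_cc(lines[1:])
--     return []
--
--
-- def extract_cc_block(text: str):
--     block = [_content(l) for l in _take_cc(_drop_non_cc(text.splitlines()))]
--     if not block:
--         return None, []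
--     return "\n".join(block).strip(), block
-- ===== Notes on version B (the rewrite author's own statement) =====
-- stated objective: alternative
-- what changed: Replaces the flag-driven single loop (in_block state, break) with a stateless two-phase decomposition: recursively drop leading non-cc lines, then recursively take the run of cc lines, and map the content extraction over the taken run.
import Mathlib
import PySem

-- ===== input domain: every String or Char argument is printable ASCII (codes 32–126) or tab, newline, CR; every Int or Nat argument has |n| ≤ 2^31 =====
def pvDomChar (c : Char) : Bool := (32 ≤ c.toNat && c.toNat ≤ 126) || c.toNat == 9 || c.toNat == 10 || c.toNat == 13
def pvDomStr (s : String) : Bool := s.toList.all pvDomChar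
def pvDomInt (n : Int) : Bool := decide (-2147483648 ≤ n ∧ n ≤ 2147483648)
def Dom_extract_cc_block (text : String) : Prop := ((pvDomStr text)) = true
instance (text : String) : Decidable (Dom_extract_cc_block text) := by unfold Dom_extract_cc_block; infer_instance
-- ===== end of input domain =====

-- B replaces A's flag-driven loop with a stateless two-phase drop/take decomposition (alternative; same cost).

-- shared by both ports: the per-line test and content extraction, identical in Source A and Source B
def ccIsCC (line : String) : Bool :=
  PySem.Str.startswith (PySem.Str.lstrip line) "//@cc:"

def ccContent (line : String) : String :=
  -- line.split("//@cc:", 1)[1]; inside the ccIsCC branch the separator occurs, so the [] / "" defaults are unreachable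
  let parts := (PySem.Str.splitMax? line "//@cc:" 1).getD []
  let content := parts.getD 1 ""
  let content := if PySem.Str.startswith content " " then String.mk (PySem.List.slice content.toList (some 1) none) else content
  -- content.rstrip("\n"): drop trailing '\n' characters (exact, hand-ported)
  String.mk ((content.toList.reverse.dropWhile (· == '\n')).reverse)

-- ===== PORT A =====
-- the for-loop of A: state = (block, in_block); 'break' returns the accumulated block
def ccLoop : List String → List String → Bool → List String
  | [], block, _ => block
  | line :: rest, block, in_block =>
    if ccIsCC line then
      ccLoop rest (block ++ [ccContent line]) true
    else if in_block then block
    else ccLoop rest block in_block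

def extract_cc_block (text : String) : Option String × List String :=
  let lines := PySem.Str.splitlines text
  let block := ccLoop lines [] false
  if block = [] then (none, [])
  else (some (PySem.Str.strip (PySem.Str.join "\n" block)), block)

-- ===== PORT B =====
-- _drop_non_cc: recursively discard leading non-cc lines
def ccDrop : List String → List String
  | [] => []
  | line :: rest => if !ccIsCC line then ccDrop rest else line :: rest

-- _take_cc: recursively keep the leading run of cc lines
def ccTake : List String → List String
  | [] => []
  | line :: rest => if ccIsCC line then line :: ccTake rest else []

def extract_cc_block_alt (text : String) : Option String × List String :=
  let block := (ccTake (ccDrop (PySem.Str.splitlines text))).map ccContent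
  if block = [] then (none, [])
  else (some (PySem.Str.strip (PySem.Str.join "\n" block)), block)

-- ===== PRECONDITION & SPEC =====
def Spec_extract_cc_block (text : String) (out : Option String × List String) : Prop := out = extract_cc_block_alt text
instance (text : String) (out : Option String × List String) : Decidable (Spec_extract_cc_block text out) := by unfold Spec_extract_cc_block; infer_instance

-- ===== CLAIM (what is proved, stated in full; the proofs are below) =====
def Claim_equal_extract_cc_block : Prop := ∀ (text : String), Dom_extract_cc_block text → Spec_extract_cc_block text (extract_cc_block text)

-- ===== LEMMAS AND PROOFS =====
-- once in the block, A's loop takes the leading run of cc lines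
theorem ccLoop_true (lines : List String) : ∀ acc,
    ccLoop lines acc true = acc ++ (ccTake lines).map ccContent := by
  induction lines with
  | nil => intro acc; simp [ccLoop, ccTake]
  | cons line rest ih =>
    intro acc
    by_cases h : ccIsCC line = true <;> simp [ccLoop, ccTake, h, ih]

-- before the block, A's loop skips non-cc lines, i.e. behaves as drop-then-take
theorem ccLoop_false (lines : List String) : ∀ acc,
    ccLoop lines acc false = acc ++ (ccTake (ccDrop lines)).map ccContent := by
  induction lines with
  | nil => intro acc; simp [ccLoop, ccDrop, ccTake]
  | cons line rest ih =>
    intro acc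
    by_cases h : ccIsCC line = true
    · simp [ccLoop, ccDrop, ccTake, h, ccLoop_true]
    · simp [ccLoop, ccDrop, h, ih]

-- ===== VERDICT (by name: the statement is the Claim_ definition above) =====
theorem extract_cc_block_spec : Claim_equal_extract_cc_block := by
  intro text _
  unfold Spec_extract_cc_block extract_cc_block extract_cc_block_alt
  simp [ccLoop_false]
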